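-- pv_equiv track=rewrite | github.com/necdetsanli/uvb76-gen | src/uvb76_gen/russian.py | format_groups_ru
-- ===== SOURCE A (Python) =====
-- from typing import Final
--
-- RUS_DIGIT_WORD: Final[dict[str, str]] = {
--     "0": "НОЛЬ",
--     "1": "ОДИН",
--     "2": "ДВА",
--     "3": "ТРИ",
--     "4": "ЧЕТЫРЕ",
--     "5": "ПЯТЬ",
--     "6": "ШЕСТЬ",
--     "7": "СЕМЬ",
--     "8": "ВОСЕМЬ",
--     "9": "ДЕВЯТЬ",
-- }
--
-- def format_group_ru(group: str) -> str:
--     """Render a 5-digit group as Russian digit words.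
--
--     Example:
--         "34179" -> "ТРИ. ЧЕТЫРЕ. ОДИН. СЕМЬ. ДЕВЯТЬ."
--
--     Notes:
--     - Non-digit characters inside the input are ignored.
--     - The function assumes the group is intended to represent exactly 5 digits;
--       callers typically pass the 5-digit cipher groups produced elsewhere.
--
--     Args:
--         group:
--             A group string that should contain digits, typically length 5.
--
--     Returns:
--         A period-separated Russian digit-word sequence with a trailing period.
--
--     """
--     digits = [ch for ch in group.strip() if ch.isdigit()]
--     tokens = [RUS_DIGIT_WORD[d] for d in digits]
--     return ". ".join(tokens) + "."
--
-- def format_groups_ru(groups: list[str], per_line: int) -> str: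
--     """Format groups into Russian digit words and wrap them into lines.
--
--     Each 5-digit group is converted via `format_group_ru` and groups are wrapped
--     so that each output line contains `per_line` groups.
--
--     Args:
--         groups:
--             List of group strings, typically produced by the cipher encoder.
--         per_line:
--             Number of groups per output line. Must be >= 1.
--
--     Returns:
--         A newline-terminated string containing wrapped lines of rendered groups.
--
--     Raises:
--         ValueError:
--             If per_line is <= 0.
--
--     """
--     if per_line <= 0:
--         raise ValueError("per_line must be >= 1")
--
--     lines: list[str] = []
--     for i in range(0, len(groups), per_line):
--         chunk = groups[i : i + per_line]
--         rendered = " ".join(format_group_ru(g) for g in chunk)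
--         lines.append(rendered)
--     return "\n".join(lines) + "\n"
-- ===== SOURCE B (Python) =====
-- # B: single pass over groups with an accumulate-and-flush line buffer instead of
-- # range-stride slicing; same output including the trailing newline.
-- from typing import Final
--
-- RUS_DIGIT_WORD: Final[dict[str, str]] = {
--     "0": "НОЛЬ",
--     "1": "ОДИН",
--     "2": "ДВА",
--     "3": "ТРИ",
--     "4": "ЧЕТЫРЕ",
--     "5": "ПЯТЬ",
--     "6": "ШЕСТЬ",
--     "7": "СЕМЬ",
--     "8": "ВОСЕМЬ",
--     "9": "ДЕВЯТЬ",
-- }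
--
--
-- def format_group_ru(group: str) -> str:
--     return ". ".join(RUS_DIGIT_WORD[ch] for ch in group.strip() if ch.isdigit()) + "."
--
--
-- def format_groups_ru(groups: list[str], per_line: int) -> str:
--     if per_line <= 0:
--         raise ValueError("per_line must be >= 1")
--
--     lines: list[str] = []
--     buf: list[str] = []
--     for g in groups:
--         buf.append(format_group_ru(g))
--         if len(buf) == per_line:
--             lines.append(" ".join(buf))
--             buf = []
--     if buf:
--         lines.append(" ".join(buf))
--     return "\n".join(lines) + "\n"
-- ===== Notes on version B (the rewrite author's own statement) =====
-- stated objective: alternative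
-- what changed: Replaced the range-stride slicing loop (groups[i:i+per_line] per line) by a single accumulate-and-flush pass that renders each group once into a line buffer and flushes the buffer whenever it reaches per_line items (plus a final partial flush).
import Mathlib
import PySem

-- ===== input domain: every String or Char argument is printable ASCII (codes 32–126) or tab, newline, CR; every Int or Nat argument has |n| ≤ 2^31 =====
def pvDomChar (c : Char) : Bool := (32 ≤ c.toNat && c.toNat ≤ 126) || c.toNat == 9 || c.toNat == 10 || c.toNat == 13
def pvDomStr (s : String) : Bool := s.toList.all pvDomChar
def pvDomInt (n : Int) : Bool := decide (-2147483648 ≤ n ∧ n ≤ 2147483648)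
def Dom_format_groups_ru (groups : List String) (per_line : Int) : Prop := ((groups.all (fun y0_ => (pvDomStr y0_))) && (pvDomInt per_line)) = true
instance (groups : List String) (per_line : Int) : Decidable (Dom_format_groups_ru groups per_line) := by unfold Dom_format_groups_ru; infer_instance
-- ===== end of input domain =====

-- B replaces A's range-stride slicing loop by a single accumulate-and-flush pass (alternative decomposition, same complexity).

-- ===== PORT A =====
def RUS_DIGIT_WORD : PySem.Dict String String := PySem.Dict.ofList
  [("0", "НОЛЬ"), ("1", "ОДИН"), ("2", "ДВА"), ("3", "ТРИ"), ("4", "ЧЕТЫРЕ"),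
   ("5", "ПЯТЬ"), ("6", "ШЕСТЬ"), ("7", "СЕМЬ"), ("8", "ВОСЕМЬ"), ("9", "ДЕВЯТЬ")]

-- RUS_DIGIT_WORD[d]: d is always a filtered digit, so the KeyError branch (get? = none) is unreachable; getD "" is exact here
def rusWord (d : Char) : String := (RUS_DIGIT_WORD.get? (String.ofList [d])).getD ""

def format_group_ru (group : String) : String :=
  let digits := (PySem.Str.strip group).toList.filter (fun ch => PySem.Chars.isdigit ch)
  let tokens := digits.map (fun d => rusWord d)
  PySem.Str.join ". " tokens ++ "."

def format_groups_ru (groups : List String) (per_line : Int) : String :=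
  -- 'if per_line <= 0: raise ValueError' — those inputs are excluded by Pre_
  let lines := (PySem.List.pyRange 0 (groups.length : Int) per_line).foldl
    (fun (lines : List String) (i : Int) =>
      let chunk := PySem.List.slice groups (some i) (some (i + per_line))
      let rendered := PySem.Str.join " " (chunk.map (fun g => format_group_ru g))
      lines ++ [rendered]) []
  PySem.Str.join "\n" lines ++ "\n"

-- ===== PORT B =====
def format_group_ru_v2 (group : String) : String :=
  PySem.Str.join ". " ((PySem.Str.strip group).toList.filterMap
    (fun ch => if PySem.Chars.isdigit ch then some (rusWord ch) else none)) ++ "."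

def format_groups_ru_alt (groups : List String) (per_line : Int) : String :=
  -- 'if per_line <= 0: raise ValueError' — those inputs are excluded by Pre_
  let st := groups.foldl
    (fun (st : List String × List String) g =>
      let buf := st.2 ++ [format_group_ru_v2 g]
      if (buf.length : Int) = per_line then (st.1 ++ [PySem.Str.join " " buf], ([] : List String))
      else (st.1, buf)) ([], [])
  let lines := if st.2 ≠ [] then st.1 ++ [PySem.Str.join " " st.2] else st.1
  PySem.Str.join "\n" lines ++ "\n"

-- ===== PRECONDITION & SPEC =====
-- Pre_ excludes exactly per_line <= 0, where the Python A raises ValueError.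
def Pre_format_groups_ru (groups : List String) (per_line : Int) : Prop := 1 ≤ per_line
instance (groups : List String) (per_line : Int) : Decidable (Pre_format_groups_ru groups per_line) := by unfold Pre_format_groups_ru; infer_instance
def pvWitness_format_groups_ru : List String × Int := (["12345", "67890", "54321"], 2)

def Spec_format_groups_ru (groups : List String) (per_line : Int) (out : String) : Prop := out = format_groups_ru_alt groups per_line
instance (groups : List String) (per_line : Int) (out : String) : Decidable (Spec_format_groups_ru groups per_line out) := by unfold Spec_format_groups_ru; infer_instance

-- ===== CLAIM (what is proved, stated in full; the proofs are below) =====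
def Claim_equal_format_groups_ru : Prop := ∀ (groups : List String) (per_line : Int), Dom_format_groups_ru groups per_line → Pre_format_groups_ru groups per_line → Spec_format_groups_ru groups per_line (format_groups_ru groups per_line)

-- ===== LEMMAS AND PROOFS =====

-- the two helper ports agree
theorem map_filter_eq_filterMap {A B : Type} (p : A → Bool) (g : A → B) :
    ∀ l : List A, (l.filter p).map g = l.filterMap (fun x => if p x then some (g x) else none) := by
  intro l
  induction l with
  | nil => rfl
  | cons x xs ih => by_cases h : p x <;> simp [h, ih]

theorem format_group_ru_v2_eq (group : String) : format_group_ru_v2 group = format_group_ru group := by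
  simp [format_group_ru_v2, format_group_ru, map_filter_eq_filterMap]

-- proof-side names for the two loop bodies (definitionally equal to the ports' lambdas)
def astep (xs : List String) (p : Int) (lines : List String) (i : Int) : List String :=
  lines ++ [PySem.Str.join " " ((PySem.List.slice xs (some i) (some (i + p))).map format_group_ru)]

def bstep (p : Int) (st : List String × List String) (g : String) : List String × List String :=
  let b := st.2 ++ [format_group_ru_v2 g]
  if (b.length : Int) = p then (st.1 ++ [PySem.Str.join " " b], ([] : List String)) else (st.1, b)

def bflush (st : List String × List String) : List String :=
  if st.2 ≠ [] then st.1 ++ [PySem.Str.join " " st.2] else st.1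

-- the rendered lines, as chunks of the token list
def rchunks (p : Nat) : List String → List String
  | [] => []
  | t :: ts => PySem.Str.join " " ((t :: ts).take p) :: rchunks p (ts.drop (p - 1))
termination_by l => l.length
decreasing_by simp

theorem rchunks_nil (p : Nat) : rchunks p [] = [] := by
  rw [rchunks.eq_def]

theorem rchunks_cons (p : Nat) (hp : 0 < p) (t : String) (ts : List String) :
    rchunks p (t :: ts) = PySem.Str.join " " ((t :: ts).take p) :: rchunks p ((t :: ts).drop p) := by
  obtain ⟨q, rfl⟩ : ∃ q, p = q + 1 := ⟨p - 1, by omega⟩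
  rw [rchunks.eq_def]
  simp

theorem rchunks_append (p : Nat) (xs ys : List String) (hp : 0 < p) (hlen : xs.length = p) :
    rchunks p (xs ++ ys) = PySem.Str.join " " xs :: rchunks p ys := by
  match xs with
  | [] => simp at hlen; omega
  | x :: xs' =>
    rw [List.cons_append, rchunks_cons p hp, ← List.cons_append]
    rw [show ((x :: xs') ++ ys).take p = x :: xs' by rw [← hlen]; exact List.take_left]
    rw [show ((x :: xs') ++ ys).drop p = ys by rw [← hlen]; exact List.drop_left]

-- pyRange facts for a positive step
theorem pyRange_pos_nil (a b s : Int) (hs : 0 < s) (h : b ≤ a) : PySem.List.pyRange a b s = [] := by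
  rw [PySem.List.pyRange_of_pos a b hs]
  simp [show ¬ a < b by omega]

theorem pyRange_pos_cons (a b s : Int) (hs : 0 < s) (h : a < b) :
    PySem.List.pyRange a b s = a :: PySem.List.pyRange (a + s) b s := by
  rw [PySem.List.pyRange_of_pos a b hs, PySem.List.pyRange_of_pos (a + s) b hs]
  have hm : 0 ≤ b - a - 1 := by omega
  have hdiv : (b - a + s - 1) / s = (b - a - 1) / s + 1 := by
    rw [show b - a + s - 1 = b - a - 1 + 1 * s by ring]
    rw [Int.add_mul_ediv_right _ _ (by omega : s ≠ 0)]
  have hq : 0 ≤ (b - a - 1) / s := Int.ediv_nonneg hm (by omega)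
  have hcount : (if a < b then ((b - a + s - 1) / s).toNat else 0)
      = (if a + s < b then ((b - (a + s) + s - 1) / s).toNat else 0) + 1 := by
    by_cases h2 : a + s < b
    · rw [if_pos h, if_pos h2, show b - (a + s) + s - 1 = b - a - 1 by ring, hdiv]
      omega
    · rw [if_pos h, if_neg h2, hdiv, Int.ediv_eq_zero_of_lt hm (by omega)]
      simp
  rw [hcount, List.range_succ_eq_map]
  simp only [List.map_cons, List.map_map]
  congr 1
  · simp
  · apply List.map_congr_left
    intro k _
    simp only [Function.comp_apply]
    push_cast
    ring

theorem pyRange_pos_shift (a b s : Int) (hs : 0 < s) :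
    PySem.List.pyRange a b s = (PySem.List.pyRange 0 (b - a) s).map (fun i => a + i) := by
  rw [PySem.List.pyRange_of_pos a b hs, PySem.List.pyRange_of_pos 0 (b - a) hs]
  have hc : (if a < b then ((b - a + s - 1) / s).toNat else 0)
      = (if (0:Int) < b - a then ((b - a - 0 + s - 1) / s).toNat else 0) := by
    by_cases h : a < b
    · rw [if_pos h, if_pos (by omega : (0:Int) < b - a)]
      congr 2
      ring
    · rw [if_neg h, if_neg (by omega)]
  rw [hc]
  simp only [List.map_map]
  apply List.map_congr_left
  intro k _
  simp only [Function.comp_apply]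
  ring

theorem slice_shift {A : Type} (xs : List A) (p i : Int) (hp : 0 ≤ p) (hi : 0 ≤ i) :
    PySem.List.slice xs (some (p + i)) (some (p + i + p)) =
      PySem.List.slice (xs.drop p.toNat) (some i) (some (i + p)) := by
  rw [PySem.List.slice_toNat xs (by omega) (by omega),
      PySem.List.slice_toNat (xs.drop p.toNat) hi (by omega)]
  rw [List.drop_drop]
  congr 1
  · omega
  · congr 1
    omega

-- A's foldl over range(0, len(xs), per_line) computes rchunks of the rendered lines
theorem A_lines (p : Int) (hp : 1 ≤ p) :
    ∀ n (xs : List String), xs.length = n → ∀ acc : List String,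
      (PySem.List.pyRange 0 (xs.length : Int) p).foldl (astep xs p) acc
      = acc ++ rchunks p.toNat (xs.map format_group_ru) := by
  intro n
  induction n using Nat.strong_induction_on with
  | _ n ih =>
    intro xs hlen acc
    match xs with
    | [] =>
      simp only [List.length_nil, Nat.cast_zero, List.map_nil]
      rw [pyRange_pos_nil 0 0 p (by omega) le_rfl, List.foldl_nil, rchunks_nil, List.append_nil]
    | t :: ts =>
      have hlen' : (0:Int) < ((t :: ts).length : Int) := by simp
      rw [pyRange_pos_cons 0 _ p (by omega) hlen', List.foldl_cons]
      have hslice0 : PySem.List.slice (t :: ts) (some 0) (some (0 + p)) = (t :: ts).take p.toNat := by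
        rw [PySem.List.slice_toNat (t :: ts) le_rfl (by omega)]
        simp
      have hstep0 : astep (t :: ts) p acc 0
          = acc ++ [PySem.Str.join " " (((t :: ts).take p.toNat).map format_group_ru)] := by
        rw [astep, hslice0, List.map_take]
      rw [zero_add, hstep0]
      by_cases hsmall : (t :: ts).length ≤ p.toNat
      · rw [pyRange_pos_nil p _ p (by omega) (by omega), List.foldl_nil]
        rw [List.take_of_length_le hsmall, List.map_cons,
            rchunks_cons p.toNat (by omega),
            List.take_of_length_le (by simpa using hsmall),
            List.drop_eq_nil_of_le (by simpa using hsmall), rchunks_nil, ← List.map_cons]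
      · rw [not_le] at hsmall
        rw [pyRange_pos_shift p _ p (by omega)]
        have hcast : ((t :: ts).length : Int) - p = (((t :: ts).drop p.toNat).length : Int) := by
          simp only [List.length_drop]
          omega
        rw [hcast]
        simp only [List.foldl_map]
        have hcong : ∀ (b : List String) (i : Int),
            i ∈ PySem.List.pyRange 0 ((((t :: ts).drop p.toNat).length : Int)) p →
            astep (t :: ts) p b (p + i) = astep ((t :: ts).drop p.toNat) p b i := by
          intro b i hi
          have hi0 : 0 ≤ i :=
            ((PySem.List.mem_pyRange_iff_of_pos (by omega : (0:Int) < p) i).mp hi).1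
          rw [astep, astep, slice_shift (t :: ts) p i (by omega) hi0]
        rw [List.foldl_ext _ (astep ((t :: ts).drop p.toNat) p) _ hcong]
        rw [ih (((t :: ts).drop p.toNat).length) (by rw [List.length_drop]; omega) _ rfl]
        rw [List.map_cons, rchunks_cons p.toNat (by omega)]
        simp [List.map_take, List.map_drop]

-- B's buffered foldl computes the same rchunks
theorem B_inv (p : Int) (hp : 1 ≤ p) :
    ∀ (gs : List String) (lines buf : List String), buf.length < p.toNat →
      bflush (gs.foldl (bstep p) (lines, buf))
      = lines ++ rchunks p.toNat (buf ++ gs.map format_group_ru_v2) := by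
  intro gs
  induction gs with
  | nil =>
    intro lines buf hb
    simp only [List.foldl_nil, List.map_nil, List.append_nil]
    match buf with
    | [] => simp [bflush, rchunks_nil]
    | b :: bs =>
      rw [rchunks_cons p.toNat (by omega),
          List.take_of_length_le (by omega), List.drop_eq_nil_of_le (by omega), rchunks_nil]
      simp [bflush]
  | cons g gs ih =>
    intro lines buf hb
    rw [List.foldl_cons]
    by_cases hfull : ((buf ++ [format_group_ru_v2 g]).length : Int) = p
    · rw [show bstep p (lines, buf) g
          = (lines ++ [PySem.Str.join " " (buf ++ [format_group_ru_v2 g])], ([] : List String)) by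
        rw [bstep]; simp only [if_pos hfull]]
      rw [ih _ [] (by simp; omega), List.nil_append, List.map_cons]
      rw [show buf ++ format_group_ru_v2 g :: gs.map format_group_ru_v2
          = (buf ++ [format_group_ru_v2 g]) ++ gs.map format_group_ru_v2 by simp]
      rw [rchunks_append p.toNat _ _ (by omega) (by simp at hfull ⊢; omega)]
      simp
    · rw [show bstep p (lines, buf) g = (lines, buf ++ [format_group_ru_v2 g]) by
        rw [bstep]; simp only [if_neg hfull]]
      rw [ih lines _ (by simp at hfull ⊢; omega), List.map_cons]
      simp

-- ===== VERDICT (by name: the statement is the Claim_ definition above) =====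
theorem format_groups_ru_spec : Claim_equal_format_groups_ru := by
  intro groups per_line _hdom hpre
  have hp1 : 1 ≤ per_line := hpre
  unfold Spec_format_groups_ru
  have eA : format_groups_ru groups per_line
      = PySem.Str.join "\n" ((PySem.List.pyRange 0 (groups.length : Int) per_line).foldl
          (astep groups per_line) []) ++ "\n" := rfl
  have eB : format_groups_ru_alt groups per_line
      = PySem.Str.join "\n" (bflush (groups.foldl (bstep per_line) ([], []))) ++ "\n" := rfl
  rw [eA, eB]
  rw [A_lines per_line hp1 groups.length groups rfl []]
  rw [B_inv per_line hp1 groups [] [] (by simp; omega)]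
  simp only [List.nil_append]
  have hmap : groups.map format_group_ru_v2 = groups.map format_group_ru :=
    List.map_congr_left (fun g _ => format_group_ru_v2_eq g)
  rw [hmap]
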